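-- pv_equiv track=rewrite | github.com/jeongyun-kim/BOJ_Programmers | 프로그래머스/2/12973. 짝지어 제거하기/짝지어 제거하기.py | solution
-- ===== SOURCE A (Python) =====
-- def solution(s):
--     answer = -1
--     # 알파벳 2개가 붙어있으면 제거 => 모두 제거 가능하면 1 / 아니면 0
--     s2 = []
--
--     for c in s :
--         if len(s2) >= 1 and s2[-1] == c :
--             s2.pop()
--         else :
--             s2.append(c)
--
--     if len(s2) == 0 :
--         answer = 1
--     else :
--         answer = 0
--
--     return answer
-- ===== SOURCE B (Python) =====
-- import re
--
-- def solution(s):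
--     # Fixpoint of one-pass removal of adjacent equal pairs; 1 iff fully removable.
--     while True:
--         t = re.sub(r'(.)\1', '', s, flags=re.S)
--         if t == s:
--             break
--         s = t
--     return 1 if s == '' else 0
-- ===== Notes on version B (the rewrite author's own statement) =====
-- stated objective: idiomatic
-- what changed: Replaced the explicit character stack with a fixpoint loop that repeatedly deletes all leftmost non-overlapping adjacent equal pairs via re.sub until the string stops changing, then tests emptiness; correctness rests on confluence of pair deletion.
import Mathlib
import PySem

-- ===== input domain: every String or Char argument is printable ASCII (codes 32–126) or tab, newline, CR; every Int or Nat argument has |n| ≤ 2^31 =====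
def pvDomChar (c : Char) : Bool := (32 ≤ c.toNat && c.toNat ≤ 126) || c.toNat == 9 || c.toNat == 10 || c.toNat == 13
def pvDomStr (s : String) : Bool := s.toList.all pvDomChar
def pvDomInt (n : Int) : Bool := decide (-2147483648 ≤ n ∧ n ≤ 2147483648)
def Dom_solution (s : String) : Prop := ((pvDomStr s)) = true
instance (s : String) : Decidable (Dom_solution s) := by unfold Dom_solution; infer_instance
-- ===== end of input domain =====

-- B removes adjacent equal pairs by repeated full passes (fixpoint) instead of A's one-pass stack; equivalence is proved via confluence of pair deletion.

-- ===== PORT A =====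
-- A: stack `s2` (top = Python list end): pop when last element equals c, else append; 1 iff empty.
def solution (s : String) : Int :=
  let s2 := s.toList.foldl
    (fun s2 c =>
      if s2.length ≥ 1 ∧ PySem.List.pyGet? s2 (-1) = some c then s2.dropLast
      else s2 ++ [c]) []
  if s2.length = 0 then 1 else 0

-- ===== PORT B =====
-- One pass of re.sub(r'(.)\1', '', s, flags=re.S): leftmost non-overlapping adjacent
-- equal pairs are deleted in a single left-to-right scan (exact regex semantics here).
def pvPass : List Char → List Char
  | [] => []
  | [c] => [c]
  | a :: b :: t => if a = b then pvPass t else a :: pvPass (b :: t)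

-- termination of the fixpoint loop: a changing pass strictly shrinks the string
theorem pvPass_lt {l : List Char} (h : pvPass l ≠ l) : (pvPass l).length < l.length := by
  have hs : (pvPass l).Sublist l := by
    clear h
    induction l using pvPass.induct with
    | case1 => simp [pvPass]
    | case2 c => simp [pvPass]
    | case3 a t ih =>
      simp only [pvPass, if_pos rfl]
      exact ih.trans ((List.sublist_cons_self a t).trans (List.sublist_cons_self a (a :: t)))
    | case4 a b t hne ih =>
      simp only [pvPass, if_neg hne]
      exact ih.cons₂ a
  rcases Nat.lt_or_ge (pvPass l).length l.length with h' | h'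
  · exact h'
  · exact absurd (hs.eq_of_length_le h') h

-- the `while True` fixpoint loop of B
def pvReduce (l : List Char) : List Char :=
  -- t = pass(l); if t == l: return l  else loop on t
  if h : pvPass l = l then l else pvReduce (pvPass l)
termination_by l.length
decreasing_by exact pvPass_lt h

def solution_alt (s : String) : Int :=
  if pvReduce s.toList = [] then 1 else 0

-- ===== PRECONDITION & SPEC =====
def Spec_solution (s : String) (out : Int) : Prop := out = solution_alt s
instance (s : String) (out : Int) : Decidable (Spec_solution s out) := by unfold Spec_solution; infer_instance

-- ===== CLAIM (what is proved, stated in full; the proofs are below) =====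
def Claim_equal_solution : Prop := ∀ (s : String), Dom_solution s → Spec_solution s (solution s)

-- ===== LEMMAS AND PROOFS =====

theorem pvPass_length_le : ∀ l : List Char, (pvPass l).length ≤ l.length := by
  intro l
  induction l using pvPass.induct with
  | case1 => simp [pvPass]
  | case2 c => simp [pvPass]
  | case3 a t ih => simp only [pvPass, if_pos rfl]; exact le_trans ih (by simp; omega)
  | case4 a b t hne ih => simp only [pvPass, if_neg hne]; simpa using ih

-- head-form of A's stack step (stack top at list head)
def pvStep (st : List Char) (c : Char) : List Char :=
  if st.head? = some c then st.tail else c :: st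

theorem pvStepEnd_eq (st : List Char) (c : Char) :
    (if st.length ≥ 1 ∧ PySem.List.pyGet? st (-1) = some c then st.dropLast else st ++ [c])
      = (pvStep st.reverse c).reverse := by
  rcases List.eq_nil_or_concat st with rfl | ⟨u, a, rfl⟩
  · simp [pvStep]
  · have hg : PySem.List.pyGet? (u ++ [a]) (-1) = some a :=
      PySem.List.pyGet?_neg_one_append_singleton u a
    by_cases h : a = c
    · subst h
      simp [pvStep, hg]
    · simp [pvStep, hg, h, Ne.symm h]

theorem foldl_end_eq (l : List Char) (st : List Char) :
    l.foldl (fun s2 c =>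
      if s2.length ≥ 1 ∧ PySem.List.pyGet? s2 (-1) = some c then s2.dropLast
      else s2 ++ [c]) st = (l.foldl pvStep st.reverse).reverse := by
  induction l generalizing st with
  | nil => simp
  | cons c t ih =>
    rw [List.foldl_cons, List.foldl_cons, pvStepEnd_eq, ih, List.reverse_reverse]

-- reduced stacks: no two adjacent equal elements
def pvRed : List Char → Prop
  | [] => True
  | [_] => True
  | a :: b :: t => a ≠ b ∧ pvRed (b :: t)

theorem pvRed_of_cons {a : Char} {l : List Char} (h : pvRed (a :: l)) : pvRed l := by
  cases l with
  | nil => trivial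
  | cons b t => exact h.2

theorem pvRed_step {st : List Char} (h : pvRed st) (c : Char) : pvRed (pvStep st c) := by
  cases st with
  | nil =>
    have he : pvStep [] c = [c] := by simp [pvStep]
    rw [he]; trivial
  | cons a t =>
    by_cases hc : a = c
    · subst hc
      simp only [pvStep, List.head?_cons, if_pos rfl, List.tail_cons]
      exact pvRed_of_cons h
    · have hne : (a :: t).head? ≠ some c := by simp [hc]
      simp only [pvStep, if_neg hne]
      exact ⟨fun he => hc he.symm, h⟩

theorem pvStep_pair {st : List Char} (h : pvRed st) (a : Char) :
    pvStep (pvStep st a) a = st := by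
  cases st with
  | nil => simp [pvStep]
  | cons x t =>
    by_cases hx : x = a
    · subst hx
      cases t with
      | nil => simp [pvStep]
      | cons y u =>
        have hxy : x ≠ y := h.1
        simp [pvStep, Ne.symm hxy]
    · simp [pvStep, Ne.symm hx, hx]

theorem foldl_pvPass (l : List Char) : ∀ st : List Char, pvRed st →
    (pvPass l).foldl pvStep st = l.foldl pvStep st := by
  induction l using pvPass.induct with
  | case1 => intro st _; rfl
  | case2 c => intro st _; rfl
  | case3 a t ih =>
    intro st hst
    have hp : pvPass (a :: a :: t) = pvPass t := by simp [pvPass]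
    rw [hp, ih st hst, List.foldl_cons, List.foldl_cons, pvStep_pair hst]
  | case4 a b t hab ih =>
    intro st hst
    simp only [pvPass, if_neg hab, List.foldl_cons]
    exact ih (pvStep st a) (pvRed_step hst a)

theorem foldl_pvReduce (l : List Char) : ∀ st : List Char, pvRed st →
    (pvReduce l).foldl pvStep st = l.foldl pvStep st := by
  induction l using pvReduce.induct with
  | case1 l h =>
    intro st hst; rw [pvReduce, dif_pos h]
  | case2 l h ih =>
    intro st hst
    rw [pvReduce, dif_neg h, ih st hst, foldl_pvPass l st hst]

theorem pvPass_fix_red : ∀ l : List Char, pvPass l = l → pvRed l := by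
  intro l
  induction l using pvPass.induct with
  | case1 => intro _; trivial
  | case2 c => intro _; trivial
  | case3 a t ih =>
    intro h
    exfalso
    have hle := pvPass_length_le t
    have hp : pvPass (a :: a :: t) = pvPass t := by simp [pvPass]
    rw [hp] at h
    have := congrArg List.length h
    simp at this
    omega
  | case4 a b t hab ih =>
    intro h
    simp only [pvPass, if_neg hab, List.cons.injEq] at h
    exact ⟨hab, ih h.2⟩

theorem pvReduce_fix (l : List Char) : pvPass (pvReduce l) = pvReduce l := by
  induction l using pvReduce.induct with
  | case1 l h => rw [pvReduce, dif_pos h]; exact h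
  | case2 l h ih => rw [pvReduce, dif_neg h]; exact ih

theorem pvRed_mid : ∀ (u : List Char) (c x : Char) (v : List Char),
    pvRed (u ++ c :: x :: v) → c ≠ x := by
  intro u
  induction u with
  | nil => intro c x v h; exact h.1
  | cons a u ih =>
    intro c x v h
    exact ih c x v (pvRed_of_cons (l := u ++ c :: x :: v) (by simpa using h))

theorem pvRed_iff (l : List Char) : pvRed l ↔ l.IsChain (· ≠ ·) := by
  induction l with
  | nil => simp [pvRed]
  | cons a t ih =>
    cases t with
    | nil => simp [pvRed]
    | cons b u =>
      rw [List.isChain_cons_cons, ← ih]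
      exact Iff.rfl

theorem pvRed_reverse {l : List Char} (h : pvRed l) : pvRed l.reverse := by
  rw [pvRed_iff] at h ⊢
  rw [List.isChain_reverse]
  exact h.imp fun _ _ hab => Ne.symm hab

theorem foldl_of_red : ∀ (l st : List Char), pvRed (l.reverse ++ st) →
    l.foldl pvStep st = l.reverse ++ st := by
  intro l
  induction l with
  | nil => intro st _; simp
  | cons c t ih =>
    intro st h
    have h' : pvRed (t.reverse ++ (c :: st)) := by simpa using h
    have hne : st.head? ≠ some c := by
      intro hc
      cases st with
      | nil => simp at hc
      | cons x u =>
        simp at hc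
        exact pvRed_mid t.reverse c x u h' hc.symm
    simp only [List.foldl_cons, pvStep, if_neg hne]
    simpa using ih (c :: st) h'

-- ===== VERDICT (by name: the statement is the Claim_ definition above) =====
theorem solution_spec : Claim_equal_solution := by
  intro s _
  unfold Spec_solution solution solution_alt
  have hred : pvRed ([] : List Char) := trivial
  have h1 : s.toList.foldl (fun s2 c =>
      if s2.length ≥ 1 ∧ PySem.List.pyGet? s2 (-1) = some c then s2.dropLast
      else s2 ++ [c]) [] = (s.toList.foldl pvStep []).reverse := by
    simpa using foldl_end_eq s.toList []
  have hfixred : pvRed (pvReduce s.toList) := pvPass_fix_red _ (pvReduce_fix s.toList)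
  have h2 : (pvReduce s.toList).foldl pvStep [] = s.toList.foldl pvStep [] :=
    foldl_pvReduce s.toList [] hred
  have h3 : (pvReduce s.toList).foldl pvStep [] = (pvReduce s.toList).reverse := by
    simpa using foldl_of_red (pvReduce s.toList) [] (by simpa using pvRed_reverse hfixred)
  rw [h1, ← h2, h3]
  by_cases h : pvReduce s.toList = []
  · simp [h]
  · have h4 : (pvReduce s.toList).reverse ≠ [] := by simpa using h
    simp [h, h4, List.length_eq_zero_iff]
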